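-- pv_equiv track=rewrite | github.com/dyakofatih/AdventOfCode | advent2022/advent16/advent16-1.py | best_flow
-- ===== SOURCE A (Python) =====
-- from queue import Queue
--
-- def best_flow(valves: dict[str, tuple[int, list[str]]], start_valve: str, time: int):
--     Q = Queue()
--     # set a dict with large distance to each valve and flow-rate
--     calculated_flow = {k: [100, v[0]] for k, v in valves.items()}
--     visited_valves = set()
--     Q.put(start_valve)
--     visited_valves.update({start_valve})
--     while not Q.empty():
--         valve = Q.get()
--         if valve == start_valve:
--             calculated_flow[valve][0] = 0
--         for u in valves[valve][1]:
--             if u not in visited_valves: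
--                 # update the distance
--                 if calculated_flow[u][0] > calculated_flow[valve][0] + 1:
--                     calculated_flow[u][0] = calculated_flow[valve][0] + 1
--
--                 Q.put(u)
--                 visited_valves.update({u})
--
--     for key, value in calculated_flow.items():
--         dist = value[0] + 1
--         flow = value[1] * (time - dist) // dist ** 2
--         calculated_flow[key] = [dist, flow]
--
--     return calculated_flow
-- ===== SOURCE B (Python) =====
-- def best_flow(valves: dict[str, tuple[int, list[str]]], start_valve: str, time: int):
--     # Bellman-Ford relaxation instead of BFS: no queue, no visited set.
--     # Distances start at 100 (0 for the start valve); since every finite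
--     # distance is capped at 100 by that initialisation, 101 rounds of
--     # relaxing every edge reach the fixpoint.
--     dist = {k: 0 if k == start_valve else 100 for k in valves}
--     for _ in range(101):
--         for v, (_, neighbours) in valves.items():
--             for u in neighbours:
--                 if dist[v] + 1 < dist[u]:
--                     dist[u] = dist[v] + 1
--     return {k: [dist[k] + 1, rate * (time - dist[k] - 1) // (dist[k] + 1) ** 2]
--             for k, (rate, _) in valves.items()}
-- ===== Notes on version B (the rewrite author's own statement) =====
-- stated objective: alternative
-- what changed: A's FIFO-queue BFS with a visited set and distances stored inside mutated [dist, rate] lists is replaced by Bellman-Ford: a plain distance map initialised to 100 (start 0) and a fixed number of rounds relaxing every edge of the graph, with no queue, no visited set and no traversal order at all; the output pass reads rates from the input dict.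
-- outside the precondition, e.g. on best_flow({'': (0, []), 'b': (0, ['c'])}, '', 0): A returns {'': [1, 0], 'b': [101, 0]}, B raises KeyError
import Mathlib
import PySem

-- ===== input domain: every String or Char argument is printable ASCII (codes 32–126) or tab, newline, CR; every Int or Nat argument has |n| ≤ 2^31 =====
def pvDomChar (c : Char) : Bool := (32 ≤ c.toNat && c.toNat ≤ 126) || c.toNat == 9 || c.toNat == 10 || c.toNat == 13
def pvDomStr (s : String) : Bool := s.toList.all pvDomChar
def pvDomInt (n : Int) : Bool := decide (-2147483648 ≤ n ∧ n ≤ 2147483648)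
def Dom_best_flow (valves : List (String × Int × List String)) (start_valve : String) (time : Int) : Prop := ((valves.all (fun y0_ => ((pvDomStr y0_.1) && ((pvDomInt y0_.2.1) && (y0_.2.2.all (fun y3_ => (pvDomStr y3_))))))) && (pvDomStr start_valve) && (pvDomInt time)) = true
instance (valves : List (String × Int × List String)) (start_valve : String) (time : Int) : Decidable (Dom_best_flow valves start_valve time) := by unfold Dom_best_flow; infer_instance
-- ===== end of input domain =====

-- B replaces A's FIFO-queue BFS (visited set, distances stored inside mutated [dist, rate] lists)
-- by Bellman-Ford: a distance map initialised to 100 (start 0) and 101 rounds relaxing every edge,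
-- with no queue and no traversal order; objective: alternative algorithm (not faster).

-- universe of names A's BFS can ever enqueue, and the count of its not-yet-visited elements
-- (termination measure of loopA below; the lemmas down to pv_neigh_sub are its decrease facts)

def pvUnvis (U : List String) (vis : PySem.Set String) : Nat :=
  (U.filter (fun x => !(List.elem x vis))).length


lemma pv_flt_mono (t vis : List String) (u : String) :
    (t.filter (fun x => !decide (x ∈ vis) && !decide (x = u))).length ≤
    (t.filter (fun x => !decide (x ∈ vis))).length := by
  induction t with
  | nil => simp
  | cons a t ih =>
    simp only [List.filter_cons]
    by_cases h : a ∈ vis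
    · simpa [h] using ih
    · by_cases h2 : a = u
      · subst h2; have := ih; simp [h]; omega
      · simp [h, h2]; omega


lemma pvUnvis_add_le (U : List String) (vis : PySem.Set String) (u : String)
    (hU : u ∈ U) (hv : u ∉ vis) : pvUnvis U (PySem.Set.add vis u) + 1 ≤ pvUnvis U vis := by
  unfold pvUnvis
  rw [PySem.Set.add_of_not_mem hv]
  have h1 : (fun x : String => !(List.elem x (vis ++ [u]))) = (fun x => !decide (x ∈ vis) && !decide (x = u)) := by
    funext x
    by_cases hx : x ∈ vis <;> by_cases h2 : x = u <;> simp [hx, h2]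
  have h2 : (fun x : String => !(List.elem x vis)) = (fun x => !decide (x ∈ vis)) := by
    funext x; simp
  rw [h1, h2]
  induction U with
  | nil => simp at hU
  | cons a t ih =>
    simp only [List.filter_cons]
    rcases List.mem_cons.mp hU with rfl | ha
    · have := pv_flt_mono t vis u
      simp [hv]
      omega
    · by_cases h : a ∈ vis
      · simpa [h] using ih ha
      · by_cases hau : a = u
        · subst hau
          have := pv_flt_mono t vis a
          simp [h]
          omega
        · have := ih ha
          simp [h, hau]
          omega


def pvUniv (V : PySem.Dict String (Int × List String)) (start : String) : List String :=
  PySem.List.dedup (start :: V.items.flatMap (fun p => p.2.2))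


lemma pv_neigh_sub (V : PySem.Dict String (Int × List String)) (start v : String) :
    ∀ u ∈ (V.getD v (0, [])).2, u ∈ pvUniv V start := by
  intro u hu
  unfold pvUniv
  rw [PySem.List.dedup_eq_ofList, PySem.Set.mem_ofList]
  rcases h : V.get? v with _ | val
  · rw [PySem.Dict.getD_eq_get?_getD, h] at hu; simp at hu
  · rw [PySem.Dict.getD_eq_get?_getD, h] at hu
    have hm := PySem.Dict.mem_items_of_get?_eq_some V h
    right
    exact List.mem_flatMap.mpr ⟨(v, val), hm, hu⟩


-- ===== PORT A =====
-- inner `for u in valves[valve][1]` loop of A's while-loop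

def relaxA (valve : String) (ns : List String) (q : List String)
    (vis : PySem.Set String) (cf : PySem.Dict String (List Int)) :
    List String × PySem.Set String × PySem.Dict String (List Int) :=
  match ns with
  | [] => (q, vis, cf)
  | u :: t =>
    if PySem.Set.contains vis u then relaxA valve t q vis cf
    else
      let cf' := if ((cf.getD u []).getD 0 0) > ((cf.getD valve []).getD 0 0) + 1
                 then cf.modify u [] (fun l => l.set 0 (((cf.getD valve []).getD 0 0) + 1))
                 else cf
      relaxA valve t (q ++ [u]) (PySem.Set.add vis u) cf'


lemma relaxA_meas (U : List String) (valve : String) :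
    ∀ (ns q : List String) (vis : PySem.Set String) (cf : PySem.Dict String (List Int)),
    (∀ u ∈ ns, u ∈ U) →
    (relaxA valve ns q vis cf).1.length + pvUnvis U (relaxA valve ns q vis cf).2.1 ≤
      q.length + pvUnvis U vis := by
  intro ns
  induction ns with
  | nil => intro q vis cf _; simp [relaxA]
  | cons u t ih =>
    intro q vis cf hns
    by_cases hu : u ∈ vis
    · have hc : PySem.Set.contains vis u = true := (PySem.Set.contains_iff vis u).mpr hu
      simp only [relaxA, hc, if_pos]
      exact ih q vis cf (fun x hx => hns x (List.mem_cons_of_mem _ hx))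
    · have hc : PySem.Set.contains vis u = false := by
        rw [Bool.eq_false_iff]; intro h; exact hu ((PySem.Set.contains_iff vis u).mp h)
      simp only [relaxA, hc, Bool.false_eq_true, if_false]
      have h1 := ih (q ++ [u]) (PySem.Set.add vis u)
        (if ((cf.getD u []).getD 0 0) > ((cf.getD valve []).getD 0 0) + 1
         then cf.modify u [] (fun l => l.set 0 (((cf.getD valve []).getD 0 0) + 1))
         else cf)
        (fun x hx => hns x (List.mem_cons_of_mem _ hx))
      have h2 := pvUnvis_add_le U vis u (hns u List.mem_cons_self) hu
      simp only [List.length_append, List.length_cons, List.length_nil] at h1 ⊢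
      omega


-- A's `while not Q.empty()` loop

def loopA (V : PySem.Dict String (Int × List String)) (start : String)
    (q : List String) (vis : PySem.Set String) (cf : PySem.Dict String (List Int)) :
    PySem.Dict String (List Int) :=
  match q with
  | [] => cf
  | v :: rest =>
    let cf1 := if v == start then cf.modify v [] (fun l => l.set 0 0) else cf
    let r := relaxA v ((V.getD v (0, [])).2) rest vis cf1
    loopA V start r.1 r.2.1 r.2.2
termination_by q.length + pvUnvis (pvUniv V start) vis
decreasing_by
  have h := relaxA_meas (pvUniv V start) v ((V.getD v (0, [])).2) rest vis
    (if h : (v == start) = true then cf.modify v [] fun l => l.set 0 0 else cf)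
    (pv_neigh_sub V start v)
  simp only [List.length_cons]
  omega


def best_flow (valves : List (String × Int × List String)) (start_valve : String) (time : Int) : List (String × List Int) :=
  let V := PySem.Dict.ofList valves
  let cf0 := V.items.foldl (fun d p => d.insert p.1 [100, p.2.1]) PySem.Dict.empty
  let vis0 := PySem.Set.add PySem.Set.empty start_valve
  let cfF := loopA V start_valve [start_valve] vis0 cf0
  cfF.items.map (fun p =>
    let dist := (p.2.getD 0 0) + 1
    (p.1, [dist, PySem.Int.floordiv ((p.2.getD 1 0) * (time - dist)) (dist ^ 2)]))


-- ===== PORT B =====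
-- B-side helpers: the three nested loops of the Bellman-Ford rounds

-- `if dist[v] + 1 < dist[u]: dist[u] = dist[v] + 1`
def bfEdge (d : PySem.Dict String Int) (v u : String) : PySem.Dict String Int :=
  if d.getD v 100 + 1 < d.getD u 100 then d.insert u (d.getD v 100 + 1) else d

-- `for u in neighbours: …`
def bfNode (d : PySem.Dict String Int) (p : String × Int × List String) : PySem.Dict String Int :=
  p.2.2.foldl (fun d u => bfEdge d p.1 u) d

-- `for v, (_, neighbours) in valves.items(): …`
def bfRound (items : List (String × Int × List String)) (d : PySem.Dict String Int) :
    PySem.Dict String Int :=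
  items.foldl bfNode d


def best_flow_alt (valves : List (String × Int × List String)) (start_valve : String) (time : Int) : List (String × List Int) :=
  let V := PySem.Dict.ofList valves
  let dist0 := V.items.foldl
    (fun d p => d.insert p.1 (if p.1 == start_valve then (0 : Int) else 100)) PySem.Dict.empty
  let distF := (PySem.List.pyRange 0 101 1).foldl (fun d _ => bfRound V.items d) dist0
  V.items.map (fun p =>
    let d := distF.getD p.1 100 + 1
    (p.1, [d, PySem.Int.floordiv (p.2.1 * (time - d)) (d ^ 2)]))


-- ===== PRECONDITION & SPEC =====
-- Pre_ excludes inputs where the start valve or some listed neighbour is not a key of `valves`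
-- (A raises KeyError as soon as the BFS touches such a name, and B's full edge scan raises
-- KeyError on any missing neighbour), and association lists with duplicate keys, which do not
-- represent any Python dict argument.

def Pre_best_flow (valves : List (String × Int × List String)) (start_valve : String) (time : Int) : Prop :=
  (valves.map Prod.fst).Nodup ∧ start_valve ∈ valves.map Prod.fst ∧
    ∀ p ∈ valves, ∀ u ∈ p.2.2, u ∈ valves.map Prod.fst


instance (valves : List (String × Int × List String)) (start_valve : String) (time : Int) : Decidable (Pre_best_flow valves start_valve time) := by unfold Pre_best_flow; infer_instance

def pvWitness_best_flow : (List (String × Int × List String)) × String × Int :=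
  ([("AA", (3, ["BB"])), ("BB", (5, ["AA", "CC"])), ("CC", (0, []))], "AA", 30)

def Spec_best_flow (valves : List (String × Int × List String)) (start_valve : String) (time : Int) (out : List (String × List Int)) : Prop := out = best_flow_alt valves start_valve time
instance (valves : List (String × Int × List String)) (start_valve : String) (time : Int) (out : List (String × List Int)) : Decidable (Spec_best_flow valves start_valve time out) := by unfold Spec_best_flow; infer_instance

-- ===== CLAIM (what is proved, stated in full; the proofs are below) =====
def Claim_equal_best_flow : Prop := ∀ (valves : List (String × Int × List String)) (start_valve : String) (time : Int), Dom_best_flow valves start_valve time → Pre_best_flow valves start_valve time → Spec_best_flow valves start_valve time (best_flow valves start_valve time)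

-- ===== LEMMAS AND PROOFS =====

-- ---------- a level-synchronous BFS, used only as a proof bridge between A and B ----------

def relaxB (level : Int) (ns : List String) (nxt : List String)
    (vis : PySem.Set String) (dist : PySem.Dict String Int) :
    List String × PySem.Set String × PySem.Dict String Int :=
  match ns with
  | [] => (nxt, vis, dist)
  | u :: t =>
    if PySem.Set.contains vis u then relaxB level t nxt vis dist
    else relaxB level t (nxt ++ [u]) (PySem.Set.add vis u)
           (dist.insert u (min (dist.getD u 100) (level + 1)))


lemma relaxB_meas (U : List String) (level : Int) :
    ∀ (ns nxt : List String) (vis : PySem.Set String) (dist : PySem.Dict String Int),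
    (∀ u ∈ ns, u ∈ U) →
    (relaxB level ns nxt vis dist).1.length + pvUnvis U (relaxB level ns nxt vis dist).2.1 ≤
      nxt.length + pvUnvis U vis := by
  intro ns
  induction ns with
  | nil => intro nxt vis dist _; simp [relaxB]
  | cons u t ih =>
    intro nxt vis dist hns
    by_cases hu : u ∈ vis
    · have hc : PySem.Set.contains vis u = true := (PySem.Set.contains_iff vis u).mpr hu
      simp only [relaxB, hc, if_pos]
      exact ih nxt vis dist (fun x hx => hns x (List.mem_cons_of_mem _ hx))
    · have hc : PySem.Set.contains vis u = false := by
        rw [Bool.eq_false_iff]; intro h; exact hu ((PySem.Set.contains_iff vis u).mp h)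
      simp only [relaxB, hc, Bool.false_eq_true, if_false]
      have h1 := ih (nxt ++ [u]) (PySem.Set.add vis u)
        (dist.insert u (min (dist.getD u 100) (level + 1)))
        (fun x hx => hns x (List.mem_cons_of_mem _ hx))
      have h2 := pvUnvis_add_le U vis u (hns u List.mem_cons_self) hu
      simp only [List.length_append, List.length_cons, List.length_nil] at h1 ⊢
      omega


def stepB (V : PySem.Dict String (Int × List String)) (level : Int)
    (f : List String) (nxt : List String) (vis : PySem.Set String)
    (dist : PySem.Dict String Int) :
    List String × PySem.Set String × PySem.Dict String Int :=
  match f with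
  | [] => (nxt, vis, dist)
  | v :: rest =>
    let r := relaxB level ((V.getD v (0, [])).2) nxt vis dist
    stepB V level rest r.1 r.2.1 r.2.2


lemma stepB_meas (V : PySem.Dict String (Int × List String)) (start : String) (level : Int) :
    ∀ (f nxt : List String) (vis : PySem.Set String) (dist : PySem.Dict String Int),
    (stepB V level f nxt vis dist).1.length + pvUnvis (pvUniv V start) (stepB V level f nxt vis dist).2.1 ≤
      nxt.length + pvUnvis (pvUniv V start) vis := by
  intro f
  induction f with
  | nil => intro nxt vis dist; simp [stepB]
  | cons v rest ih =>
    intro nxt vis dist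
    simp only [stepB]
    have h1 := relaxB_meas (pvUniv V start) level ((V.getD v (0, [])).2) nxt vis dist
      (pv_neigh_sub V start v)
    have h2 := ih (relaxB level ((V.getD v (0, [])).2) nxt vis dist).1
      (relaxB level ((V.getD v (0, [])).2) nxt vis dist).2.1
      (relaxB level ((V.getD v (0, [])).2) nxt vis dist).2.2
    omega


def loopB (V : PySem.Dict String (Int × List String)) (start : String)
    (f : List String) (vis : PySem.Set String) (dist : PySem.Dict String Int)
    (level : Int) : PySem.Dict String Int :=
  match f with
  | [] => dist
  | v :: rest =>
    let r := stepB V level (v :: rest) [] vis dist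
    loopB V start r.1 r.2.1 r.2.2 (level + 1)
termination_by pvUnvis (pvUniv V start) vis + f.length
decreasing_by
  have h := stepB_meas V start level (v :: rest) [] vis dist
  simp only [List.length_cons, List.length_nil] at h ⊢
  omega


-- the level-BFS shaped computation that A is first proved equal to
def levelAlt (valves : List (String × Int × List String)) (start_valve : String) (time : Int) : List (String × List Int) :=
  let V := PySem.Dict.ofList valves
  let dist0 := (V.items.foldl (fun d p => d.insert p.1 (100 : Int)) PySem.Dict.empty).insert start_valve 0
  let vis0 := PySem.Set.add PySem.Set.empty start_valve
  let distF := loopB V start_valve [start_valve] vis0 dist0 0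
  V.items.map (fun p =>
    let d := distF.getD p.1 100 + 1
    (p.1, [d, PySem.Int.floordiv (p.2.1 * (time - d)) (d ^ 2)]))


lemma relax_sim (V : PySem.Dict String (Int × List String)) (level : Int) (valve : String)
    (hlevel : 0 ≤ level) :
    ∀ (ns q nxt : List String) (vis : PySem.Set String)
      (cf : PySem.Dict String (List Int)) (dist : PySem.Dict String Int),
    (∀ u ∈ ns, u ∈ V.keys) →
    valve ∈ vis →
    (cf.getD valve []).getD 0 0 = min level 100 →
    (∀ k ∈ V.keys, cf.getD k [] = [dist.getD k 100, (V.getD k (0, [])).1]) →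
    (∀ x, x ∉ vis → dist.getD x 100 = 100) →
    cf.keys = V.keys →
    ∃ (δ : List String) (vis' : PySem.Set String)
      (cf' : PySem.Dict String (List Int)) (dist' : PySem.Dict String Int),
      relaxA valve ns q vis cf = (q ++ δ, vis', cf') ∧
      relaxB level ns nxt vis dist = (nxt ++ δ, vis', dist') ∧
      (∀ x ∈ vis, x ∈ vis') ∧
      (∀ x ∈ vis, dist'.getD x 100 = dist.getD x 100) ∧
      (∀ u ∈ δ, u ∈ V.keys ∧ u ∈ vis' ∧ dist'.getD u 100 = min (level + 1) 100) ∧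
      (∀ k ∈ V.keys, cf'.getD k [] = [dist'.getD k 100, (V.getD k (0, [])).1]) ∧
      (∀ x, x ∉ vis' → dist'.getD x 100 = 100) ∧
      cf'.keys = V.keys := by
  intro ns
  induction ns with
  | nil =>
    intro q nxt vis cf dist _ _ _ h1 h2 h7
    exact ⟨[], vis, cf, dist, by simp [relaxA], by simp [relaxB],
      fun x hx => hx, fun x _ => rfl, by simp, h1, h2, h7⟩
  | cons u t ih =>
    intro q nxt vis cf dist hns hvalve hdv h1 h2 h7
    by_cases hu : u ∈ vis
    · have hc : PySem.Set.contains vis u = true := (PySem.Set.contains_iff vis u).mpr hu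
      simp only [relaxA, relaxB, hc, if_pos]
      exact ih q nxt vis cf dist (fun x hx => hns x (List.mem_cons_of_mem _ hx)) hvalve hdv h1 h2 h7
    · have hc : PySem.Set.contains vis u = false := by
        rw [Bool.eq_false_iff]; intro h; exact hu ((PySem.Set.contains_iff vis u).mp h)
      have huk : u ∈ V.keys := hns u List.mem_cons_self
      have hne : u ≠ valve := fun h => hu (h ▸ hvalve)
      have hcfu : cf.getD u [] = [dist.getD u 100, (V.getD u (0, [])).1] := h1 u huk
      have hdu : dist.getD u 100 = 100 := h2 u hu
      have hread : (cf.getD u []).getD 0 0 = 100 := by rw [hcfu, hdu]; simp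
      simp only [relaxA, relaxB, hc, Bool.false_eq_true, if_false]
      rw [hread, hdv]
      set dist1 := dist.insert u (min (dist.getD u 100) (level + 1)) with hdist1
      have hdist1D : ∀ x, dist1.getD x 100 = if x = u then min (100 : Int) (level + 1) else dist.getD x 100 := by
        intro x
        rw [hdist1, PySem.Dict.getD_insert, hdu]
      have hmadd : ∀ (s : PySem.Set String) (x y : String), y ∈ s ∨ y = x → y ∈ PySem.Set.add s x :=
        fun s x y h => (PySem.Set.mem_add s x y).mpr h
      have hnmadd : ∀ (s : PySem.Set String) (x y : String), y ∉ PySem.Set.add s x → y ∉ s ∧ y ≠ x := by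
        intro s x y h
        constructor
        · exact fun hy => h (hmadd s x y (Or.inl hy))
        · exact fun hy => h (hmadd s x y (Or.inr hy))
      have hcontains : cf.contains u = true := by
        rw [PySem.Dict.contains_iff_mem_keys, h7]; exact huk
      by_cases hcond : (100 : Int) > min level 100 + 1
      · rw [if_pos hcond]
        have hmin1 : min level 100 = level := by
          rcases le_total level 100 with h | h
          · exact min_eq_left h
          · rw [min_eq_right h] at hcond; omega
        have h98 : level ≤ 98 := by rw [hmin1] at hcond; omega
        have hmin2 : min (100 : Int) (level + 1) = level + 1 := min_eq_right (by omega)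
        set cf1 := cf.modify u [] (fun l => l.set 0 (min level 100 + 1)) with hcf1
        have hcf1D : ∀ k, cf1.getD k [] =
            if k = u then [min level 100 + 1, (V.getD u (0, [])).1] else cf.getD k [] := by
          intro k
          rw [hcf1, PySem.Dict.modify, PySem.Dict.getD_insert, hcfu, hdu]
          by_cases hk : k = u <;> simp [hk]
        have hkeys1 : cf1.keys = V.keys := by
          rw [hcf1, PySem.Dict.modify, PySem.Dict.keys_insert_of_contains _ _ hcontains, h7]
        obtain ⟨δ', vis', cf', dist', hA, hB, hmono, hpres, hδ, h1', h2', h7'⟩ :=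
          ih (q ++ [u]) (nxt ++ [u]) (PySem.Set.add vis u) cf1 dist1
            (fun x hx => hns x (List.mem_cons_of_mem _ hx))
            (hmadd vis u valve (Or.inl hvalve))
            (by rw [hcf1D, if_neg (Ne.symm hne)]; exact hdv)
            (by
              intro k hk
              rw [hcf1D, hdist1D]
              by_cases hku : k = u
              · subst hku
                rw [if_pos rfl, if_pos rfl, hmin1, hmin2]
              · rw [if_neg hku, if_neg hku]; exact h1 k hk)
            (by
              intro x hx
              obtain ⟨hxv, hxu⟩ := hnmadd vis u x hx
              rw [hdist1D, if_neg hxu]; exact h2 x hxv)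
            hkeys1
        refine ⟨u :: δ', vis', cf', dist', ?_, ?_, ?_, ?_, ?_, h1', h2', h7'⟩
        · rw [hA]; simp
        · rw [hB]; simp
        · intro x hx; exact hmono x (hmadd vis u x (Or.inl hx))
        · intro x hx
          have hxu : x ≠ u := fun h => hu (h ▸ hx)
          rw [hpres x (hmadd vis u x (Or.inl hx)), hdist1D, if_neg hxu]
        · intro w hw
          rcases List.mem_cons.mp hw with hwu | hw'
          · subst hwu
            refine ⟨huk, hmono w (hmadd vis w w (Or.inr rfl)), ?_⟩
            rw [hpres w (hmadd vis w w (Or.inr rfl)), hdist1D, if_pos rfl, hmin2]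
            exact (min_eq_left (by omega)).symm
          · exact hδ w hw'
      · rw [if_neg hcond]
        have hge : (99 : Int) ≤ level := by
          rcases le_total level 100 with h | h
          · rw [min_eq_left h] at hcond; omega
          · omega
        have hdist1D' : ∀ x, dist1.getD x 100 = dist.getD x 100 := by
          intro x
          rw [hdist1D]
          by_cases hx : x = u
          · subst hx; rw [if_pos rfl, hdu]
            exact min_eq_left (by omega)
          · rw [if_neg hx]
        obtain ⟨δ', vis', cf', dist', hA, hB, hmono, hpres, hδ, h1', h2', h7'⟩ :=
          ih (q ++ [u]) (nxt ++ [u]) (PySem.Set.add vis u) cf dist1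
            (fun x hx => hns x (List.mem_cons_of_mem _ hx))
            (hmadd vis u valve (Or.inl hvalve))
            hdv
            (by intro k hk; rw [hdist1D']; exact h1 k hk)
            (by
              intro x hx
              obtain ⟨hxv, hxu⟩ := hnmadd vis u x hx
              rw [hdist1D']; exact h2 x hxv)
            h7
        refine ⟨u :: δ', vis', cf', dist', ?_, ?_, ?_, ?_, ?_, h1', h2', h7'⟩
        · rw [hA]; simp
        · rw [hB]; simp
        · intro x hx; exact hmono x (hmadd vis u x (Or.inl hx))
        · intro x hx
          rw [hpres x (hmadd vis u x (Or.inl hx)), hdist1D']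
        · intro w hw
          rcases List.mem_cons.mp hw with hwu | hw'
          · subst hwu
            refine ⟨huk, hmono w (hmadd vis w w (Or.inr rfl)), ?_⟩
            rw [hpres w (hmadd vis w w (Or.inr rfl)), hdist1D, if_pos rfl,
              min_eq_left (by omega : (100:Int) ≤ level + 1)]
            exact (min_eq_right (by omega)).symm
          · exact hδ w hw'


def loopBcont (V : PySem.Dict String (Int × List String)) (start : String)
    (f nxt : List String) (vis : PySem.Set String) (dist : PySem.Dict String Int)
    (level : Int) : PySem.Dict String Int :=
  loopB V start (stepB V level f nxt vis dist).1 (stepB V level f nxt vis dist).2.1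
    (stepB V level f nxt vis dist).2.2 (level + 1)


lemma loopB_eq_cont (V : PySem.Dict String (Int × List String)) (start : String)
    (f : List String) (vis : PySem.Set String) (dist : PySem.Dict String Int) (level : Int) :
    loopB V start f vis dist level = loopBcont V start f [] vis dist level := by
  cases f with
  | nil => rw [loopB, loopBcont]; simp [stepB, loopB]
  | cons v rest => rw [loopB, loopBcont]


lemma loopA_cons (V : PySem.Dict String (Int × List String)) (start v : String)
    (rest : List String) (vis : PySem.Set String) (cf : PySem.Dict String (List Int)) :
    loopA V start (v :: rest) vis cf =
      loopA V start
        (relaxA v ((V.getD v (0, [])).2) rest vis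
          (if v == start then cf.modify v [] (fun l => l.set 0 0) else cf)).1
        (relaxA v ((V.getD v (0, [])).2) rest vis
          (if v == start then cf.modify v [] (fun l => l.set 0 0) else cf)).2.1
        (relaxA v ((V.getD v (0, [])).2) rest vis
          (if v == start then cf.modify v [] (fun l => l.set 0 0) else cf)).2.2 := by
  rw [loopA]


lemma loopA_nil (V : PySem.Dict String (Int × List String)) (start : String)
    (vis : PySem.Set String) (cf : PySem.Dict String (List Int)) :
    loopA V start [] vis cf = cf := by rw [loopA]


lemma loopBcont_nil_nil (V : PySem.Dict String (Int × List String)) (start : String)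
    (vis : PySem.Set String) (dist : PySem.Dict String Int) (level : Int) :
    loopBcont V start [] [] vis dist level = dist := by
  simp only [loopBcont, stepB]
  rw [loopB]


lemma neigh_keys (V : PySem.Dict String (Int × List String))
    (hnb : ∀ p ∈ V.items, ∀ u ∈ p.2.2, u ∈ V.keys) (v : String) :
    ∀ u ∈ (V.getD v (0, [])).2, u ∈ V.keys := by
  intro u hu
  rcases h : V.get? v with _ | val
  · rw [PySem.Dict.getD_eq_get?_getD, h] at hu; simp at hu
  · rw [PySem.Dict.getD_eq_get?_getD, h] at hu
    exact hnb (v, val) (PySem.Dict.mem_items_of_get?_eq_some V h) u hu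


lemma sim (V : PySem.Dict String (Int × List String)) (start : String)
    (hnb : ∀ p ∈ V.items, ∀ u ∈ p.2.2, u ∈ V.keys) :
    ∀ (N : Nat) (f nxt : List String) (vis : PySem.Set String)
      (cf : PySem.Dict String (List Int)) (dist : PySem.Dict String Int) (level : Int),
    2 * f.length + 3 * nxt.length + 3 * pvUnvis V.keys vis ≤ N →
    (∀ k ∈ V.keys, cf.getD k [] = [dist.getD k 100, (V.getD k (0, [])).1]) →
    (∀ x, x ∉ vis → dist.getD x 100 = 100) →
    cf.keys = V.keys →
    (∀ v ∈ f, v ∈ vis ∧ v ∈ V.keys ∧ dist.getD v 100 = min level 100) →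
    (∀ v ∈ nxt, v ∈ vis ∧ v ∈ V.keys ∧ dist.getD v 100 = min (level + 1) 100) →
    start ∈ vis →
    dist.getD start 100 = 0 →
    0 ≤ level →
    (∀ k ∈ V.keys, (loopA V start (f ++ nxt) vis cf).getD k [] =
        [(loopBcont V start f nxt vis dist level).getD k 100, (V.getD k (0, [])).1]) ∧
      (loopA V start (f ++ nxt) vis cf).keys = V.keys := by
  intro N
  induction N with
  | zero =>
    intro f nxt vis cf dist level hM hI1 hI2 hI7 hIf hInxt hsv hsd hlevel
    have hf : f = [] := List.length_eq_zero_iff.mp (by omega)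
    have hn : nxt = [] := List.length_eq_zero_iff.mp (by omega)
    subst hf; subst hn
    rw [List.nil_append, loopA_nil, loopBcont_nil_nil]
    exact ⟨hI1, hI7⟩
  | succ N ih =>
    intro f nxt vis cf dist level hM hI1 hI2 hI7 hIf hInxt hsv hsd hlevel
    match f with
    | [] =>
      match nxt with
      | [] =>
        rw [List.nil_append, loopA_nil, loopBcont_nil_nil]
        exact ⟨hI1, hI7⟩
      | n :: ns =>
        have hcont : loopBcont V start [] (n :: ns) vis dist level =
            loopBcont V start (n :: ns) [] vis dist (level + 1) := by
          have e1 : loopBcont V start [] (n :: ns) vis dist level =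
              loopB V start (n :: ns) vis dist (level + 1) := by
            simp only [loopBcont, stepB]
          rw [e1, loopB_eq_cont]
        rw [List.nil_append, hcont]
        have := ih (n :: ns) [] vis cf dist (level + 1)
          (by simp only [List.length_cons, List.length_nil] at hM ⊢; omega)
          hI1 hI2 hI7 hInxt (by simp) hsv hsd (by omega)
        simpa using this
    | v :: rest =>
      obtain ⟨hvv, hvk, hvd⟩ := hIf v List.mem_cons_self
      rw [List.cons_append, loopA_cons]
      have hbeq : ((v == start) = true) ↔ v = start := beq_iff_eq
      have hcf1D : ∀ k, (if v == start then cf.modify v [] (fun l => l.set 0 0) else cf).getD k [] =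
          cf.getD k [] := by
        intro k
        by_cases hvs : v = start
        · subst hvs
          have h0 : dist.getD v 100 = 0 := hsd
          rw [if_pos (hbeq.mpr rfl), PySem.Dict.modify, PySem.Dict.getD_insert]
          by_cases hk : k = v
          · subst hk
            rw [if_pos rfl, hI1 k hvk, h0]
            simp
          · rw [if_neg hk]
        · rw [if_neg (fun h => hvs (hbeq.mp h))]
      have hkeys1 : (if v == start then cf.modify v [] (fun l => l.set 0 0) else cf).keys = V.keys := by
        by_cases hvs : v = start
        · subst hvs
          rw [if_pos (hbeq.mpr rfl), PySem.Dict.modify,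
            PySem.Dict.keys_insert_of_contains _ _
              (by rw [PySem.Dict.contains_iff_mem_keys, hI7]; exact hvk), hI7]
        · rw [if_neg (fun h => hvs (hbeq.mp h)), hI7]
      have hdvA : ((if v == start then cf.modify v [] (fun l => l.set 0 0) else cf).getD v []).getD 0 0 =
          min level 100 := by
        rw [hcf1D, hI1 v hvk]
        simpa using hvd
      obtain ⟨δ, vis', cf', dist', hA, hB, hmono, hpres, hδ, h1', h2', h7'⟩ :=
        relax_sim V level v hlevel ((V.getD v (0, [])).2) (rest ++ nxt) nxt vis
          (if v == start then cf.modify v [] (fun l => l.set 0 0) else cf) dist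
          (neigh_keys V hnb v) hvv hdvA
          (fun k hk => by rw [hcf1D]; exact hI1 k hk) hI2 hkeys1
      have hmeas := relaxA_meas V.keys v ((V.getD v (0, [])).2) (rest ++ nxt) vis
        (if v == start then cf.modify v [] (fun l => l.set 0 0) else cf)
        (neigh_keys V hnb v)
      rw [hA] at hmeas
      simp only [List.length_append] at hmeas
      have hih := ih rest (nxt ++ δ) vis' cf' dist' level
        (by simp only [List.length_append]; simp only [List.length_cons] at hM; omega)
        h1' h2' h7'
        (by
          intro w hw
          obtain ⟨h1w, h2w, h3w⟩ := hIf w (List.mem_cons_of_mem _ hw)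
          exact ⟨hmono w h1w, h2w, by rw [hpres w h1w]; exact h3w⟩)
        (by
          intro w hw
          rcases List.mem_append.mp hw with hw' | hw'
          · obtain ⟨h1w, h2w, h3w⟩ := hInxt w hw'
            exact ⟨hmono w h1w, h2w, by rw [hpres w h1w]; exact h3w⟩
          · obtain ⟨h1w, h2w, h3w⟩ := hδ w hw'
            exact ⟨h2w, h1w, h3w⟩)
        (hmono start hsv)
        (by rw [hpres start hsv]; exact hsd)
        hlevel
      have hBcont : loopBcont V start (v :: rest) nxt vis dist level =
          loopBcont V start rest (nxt ++ δ) vis' dist' level := by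
        simp only [loopBcont, stepB]
        rw [hB]
      rw [hBcont, hA]
      rw [List.append_assoc]
      exact hih


lemma get?_foldl_insert {ν β : Type} (f : String × β → ν) :
    ∀ (l : List (String × β)) (d0 : PySem.Dict String ν) (k : String),
    (l.map Prod.fst).Nodup →
    (l.foldl (fun d p => d.insert p.1 (f p)) d0).get? k =
      (match l.find? (fun p => p.1 == k) with
       | some p => some (f p)
       | none => d0.get? k) := by
  intro l
  induction l with
  | nil => simp
  | cons q t ih =>
    intro d0 k hnd
    rw [List.map_cons, List.nodup_cons] at hnd
    obtain ⟨hq1, hnt⟩ := hnd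
    simp only [List.foldl_cons]
    rw [ih _ k hnt]
    by_cases hqk : q.1 = k
    · have hfind : t.find? (fun p => p.1 == k) = none := by
        rw [List.find?_eq_none]
        intro p hp
        simp only [beq_iff_eq]
        intro hpk
        exact hq1 (by rw [hqk, ← hpk]; exact List.mem_map_of_mem hp)
      subst hqk
      rw [hfind]
      simp only [List.find?_cons, beq_self_eq_true]
      exact PySem.Dict.get?_insert_self d0 q.1 (f q)
    · have hqf : (fun (p : String × β) => p.1 == k) q = false := by simpa using hqk
      simp only [List.find?_cons, hqf]
      rcases hf : t.find? (fun p => p.1 == k) with _ | p <;> rw [hf]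
      exact PySem.Dict.get?_insert_of_ne d0 (f q) (Ne.symm hqk)


lemma ofList_items_of_nodup {β : Type} (l : List (String × β))
    (h : (l.map Prod.fst).Nodup) : (PySem.Dict.ofList l).items = l := by
  induction l using List.reverseRecOn with
  | nil => rfl
  | append_singleton t p ih =>
    rw [List.map_append, List.nodup_append] at h
    obtain ⟨ht, _, hdisj⟩ := h
    have hp1 : p.1 ∉ t.map Prod.fst := by
      intro hm
      exact hdisj p.1 hm p.1 (by simp) rfl
    have hfold : PySem.Dict.ofList (t ++ [p]) = (PySem.Dict.ofList t).insert p.1 p.2 := by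
      unfold PySem.Dict.ofList PySem.Dict.update
      rw [List.foldl_append]
      rfl
    have hkeys : (PySem.Dict.ofList t).keys = t.map Prod.fst := by
      have := PySem.Dict.keys_foldl_insert_key t Prod.fst
        (fun (_ : PySem.Dict String β) (p : String × β) => p.2) PySem.Dict.empty
      unfold PySem.Dict.ofList PySem.Dict.update
      rw [this, PySem.Dict.keys_empty, PySem.Set.update_nil_left,
        PySem.Set.ofList_eq_self_of_nodup _ ht]
    have hcont : (PySem.Dict.ofList t).contains p.1 = false := by
      rw [Bool.eq_false_iff]
      intro hc
      rw [PySem.Dict.contains_iff_mem_keys, hkeys] at hc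
      exact hp1 hc
    rw [hfold, PySem.Dict.items_insert_of_not_contains _ _ hcont, ih ht]


lemma items_map_getD {ν A : Type} (d : PySem.Dict String ν) (h : d.keys.Nodup)
    (g : String × ν → A) (dflt : ν) :
    d.items.map g = d.keys.map (fun k => g (k, d.getD k dflt)) := by
  simp only [PySem.Dict.keys, List.map_map]
  apply List.map_congr_left
  intro p hp
  have : d.getD p.1 dflt = p.2 := PySem.Dict.getD_of_mem_items d (by simpa using hp) h dflt
  simp [Function.comp, this]


theorem main_equiv (valves : List (String × Int × List String)) (start : String) (time : Int)
    (hpre : Pre_best_flow valves start time) :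
    best_flow valves start time = levelAlt valves start time := by
  obtain ⟨hnd, hsk, hnb⟩ := hpre
  simp only [best_flow, levelAlt]
  set V := PySem.Dict.ofList valves with hV
  have hVit : V.items = valves := ofList_items_of_nodup valves hnd
  have hVkeys : V.keys = valves.map Prod.fst := by
    simp only [PySem.Dict.keys, hVit]
  have hknd : V.keys.Nodup := by rw [hVkeys]; exact hnd
  have hskV : start ∈ V.keys := by rw [hVkeys]; exact hsk
  have hnbV : ∀ p ∈ V.items, ∀ u ∈ p.2.2, u ∈ V.keys := by
    rw [hVit]
    intro p hp u hu
    rw [hVkeys]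
    exact hnb p hp u hu
  have hmapfst : (V.items.map Prod.fst).Nodup := by
    rw [hVit]; exact hnd
  set cf0 := V.items.foldl (fun d p => d.insert p.1 [(100 : Int), p.2.1]) PySem.Dict.empty with hcf0
  have hcf0D : ∀ k ∈ V.keys, cf0.getD k [] = [100, (V.getD k (0, [])).1] := by
    intro k hk
    have hfold := get?_foldl_insert (fun p => [(100 : Int), p.2.1]) V.items PySem.Dict.empty k hmapfst
    rcases hf : V.items.find? (fun p => p.1 == k) with _ | p
    · exfalso
      have : V.get? k = none := by
        show (V.items.find? (fun p => p.1 == k)).map (fun x => x.2) = none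
        rw [hf]; rfl
      exact (PySem.Dict.get?_eq_none_iff_not_mem_keys V k).mp this hk
    · have hvget : V.get? k = some p.2 := by
        show (V.items.find? (fun p => p.1 == k)).map (fun x => x.2) = some p.2
        rw [hf]; rfl
      rw [hf] at hfold
      rw [PySem.Dict.getD_eq_get?_getD, hfold]
      rw [PySem.Dict.getD_eq_get?_getD, hvget]
      simp
  have hcf0keys : cf0.keys = V.keys := by
    rw [hcf0, PySem.Dict.keys_foldl_insert_key V.items Prod.fst
      (fun _ p => [(100 : Int), p.2.1]) PySem.Dict.empty,
      PySem.Dict.keys_empty, PySem.Set.update_nil_left]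
    exact PySem.Set.ofList_eq_self_of_nodup _ (by simpa using hknd)
  set dist0 := (V.items.foldl (fun d p => d.insert p.1 (100 : Int)) PySem.Dict.empty).insert start 0 with hdist0
  have hdist0D : ∀ k, dist0.getD k 100 = if k = start then 0 else 100 := by
    intro k
    rw [hdist0, PySem.Dict.getD_insert]
    by_cases hks : k = start
    · rw [if_pos hks, if_pos hks]
    · rw [if_neg hks, if_neg hks]
      have hfold := get?_foldl_insert (fun _ => (100 : Int)) V.items PySem.Dict.empty k hmapfst
      rw [PySem.Dict.getD_eq_get?_getD, hfold]
      rcases hf : V.items.find? (fun p => p.1 == k) with _ | p <;> rw [hf] <;> rfl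
  set vis0 := PySem.Set.add PySem.Set.empty start with hvis0
  have hvis0L : vis0 = [start] := by
    rfl
  have hmem0 : ∀ x, x ∈ vis0 ↔ x = start := by
    intro x; rw [hvis0L]; simp
  set rs := (V.getD start (0, [])).1 with hrs
  rw [loopA_cons]
  rw [if_pos (beq_self_eq_true start)]
  set cf1 := cf0.modify start [] (fun l => l.set 0 0) with hcf1d
  have hcf1D : ∀ k, cf1.getD k [] = if k = start then [0, rs] else cf0.getD k [] := by
    intro k
    rw [hcf1d, PySem.Dict.modify, PySem.Dict.getD_insert, hcf0D start hskV]
    by_cases hk : k = start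
    · rw [if_pos hk, if_pos hk]
      simp [hrs]
    · rw [if_neg hk, if_neg hk]
  have hkeys1 : cf1.keys = V.keys := by
    rw [hcf1d, PySem.Dict.modify, PySem.Dict.keys_insert_of_contains _ _
      (by rw [PySem.Dict.contains_iff_mem_keys, hcf0keys]; exact hskV), hcf0keys]
  obtain ⟨δ, vis', cf', dist', hA, hB, hmono, hpres, hδ, h1', h2', h7'⟩ :=
    relax_sim V 0 start le_rfl ((V.getD start (0, [])).2) [] [] vis0 cf1 dist0
      (neigh_keys V hnbV start)
      ((hmem0 start).mpr rfl)
      (by rw [hcf1D start, if_pos rfl]; simp)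
      (by
        intro k hk
        rw [hcf1D k, hdist0D k]
        by_cases hks : k = start
        · subst hks
          rw [if_pos rfl, if_pos rfl, hrs]
        · rw [if_neg hks, if_neg hks]
          exact hcf0D k hk)
      (by
        intro x hx
        rw [hdist0D x, if_neg (fun h => hx ((hmem0 x).mpr h))])
      hkeys1
  rw [hA]
  simp only [List.nil_append]
  have hBrw : loopB V start [start] vis0 dist0 0 = loopBcont V start δ [] vis' dist' (0 + 1) := by
    rw [loopB_eq_cont]
    have e1 : loopBcont V start [start] [] vis0 dist0 0 =
        loopB V start (relaxB 0 ((V.getD start (0, [])).2) [] vis0 dist0).1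
          (relaxB 0 ((V.getD start (0, [])).2) [] vis0 dist0).2.1
          (relaxB 0 ((V.getD start (0, [])).2) [] vis0 dist0).2.2 (0 + 1) := by
      simp only [loopBcont, stepB]
    rw [e1, hB]
    simp only [List.nil_append]
    rw [loopB_eq_cont]
  have h01 : (0 : Int) + 1 = 1 := by norm_num
  rw [h01] at hBrw
  rw [hBrw]
  obtain ⟨hpoint, hkeysF⟩ := sim V start hnbV
    (2 * δ.length + 3 * pvUnvis V.keys vis') δ [] vis' cf' dist' 1
    (by simp)
    h1' h2' h7'
    (fun u hu => by
      obtain ⟨h1u, h2u, h3u⟩ := hδ u hu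
      exact ⟨h2u, h1u, by rw [h3u, h01]⟩)
    (by simp)
    (hmono start ((hmem0 start).mpr rfl))
    (by rw [hpres start ((hmem0 start).mpr rfl), hdist0D, if_pos rfl])
    (by omega)
  rw [List.append_nil] at hpoint hkeysF
  rw [items_map_getD (loopA V start δ vis' cf') (by rw [hkeysF]; exact hknd) _ []]
  rw [items_map_getD V hknd _ (0, [])]
  rw [hkeysF]
  apply List.map_congr_left
  intro k hk
  rw [hpoint k hk]
  simp



-- ---------- the common specification: capped BFS distance via reachability balls ----------

-- ball V start k = nodes reachable from start in at most k steps (as a membership list)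
def ball (V : PySem.Dict String (Int × List String)) (start : String) : Nat → List String
  | 0 => [start]
  | k + 1 => ball V start k ++ (ball V start k).flatMap (fun v => (V.getD v (0, [])).2)

lemma mem_ball_zero (V : PySem.Dict String (Int × List String)) (start x : String) :
    x ∈ ball V start 0 ↔ x = start := by simp [ball]

lemma mem_ball_succ (V : PySem.Dict String (Int × List String)) (start x : String) (k : Nat) :
    x ∈ ball V start (k + 1) ↔
      x ∈ ball V start k ∨ ∃ v ∈ ball V start k, x ∈ (V.getD v (0, [])).2 := by
  simp [ball]

lemma ball_mono (V : PySem.Dict String (Int × List String)) (start : String) {j k : Nat}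
    (h : j ≤ k) : ∀ x, x ∈ ball V start j → x ∈ ball V start k := by
  induction k with
  | zero => intro x hx; rwa [Nat.le_zero.mp h] at hx
  | succ k ih =>
    intro x hx
    by_cases hj : j = k + 1
    · exact hj ▸ hx
    · exact (mem_ball_succ V start x k).mpr (Or.inl (ih (by omega) x hx))

lemma ball_stable (V : PySem.Dict String (Int × List String)) (start : String) (L : Nat)
    (h : ∀ x, x ∈ ball V start (L + 1) → x ∈ ball V start L) :
    ∀ m x, x ∈ ball V start m → x ∈ ball V start L := by
  have key : ∀ m x, x ∈ ball V start (L + m) → x ∈ ball V start L := by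
    intro m
    induction m with
    | zero => intro x hx; exact hx
    | succ m ih =>
      intro x hx
      rcases (mem_ball_succ V start x (L + m)).mp hx with hx' | ⟨v, hv, hadj⟩
      · exact ih x hx'
      · exact h x ((mem_ball_succ V start x L).mpr (Or.inr ⟨v, ih v hv, hadj⟩))
  intro m x hx
  rcases le_or_gt m L with hm | hm
  · exact ball_mono V start hm x hx
  · have : L + (m - L) = m := by omega
    exact key (m - L) x (by rwa [this])

-- capped least index: min over k ≤ 100 of (u ∈ ball k), else 100
def dSpec (V : PySem.Dict String (Int × List String)) (start u : String) : Int :=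
  if h : ∃ k, k ∈ List.range 101 ∧ u ∈ ball V start k then ((Nat.find h : Nat) : Int) else 100

lemma dSpec_of_least (V : PySem.Dict String (Int × List String)) (start u : String) (j : Nat)
    (hj : u ∈ ball V start j) (hmin : ∀ i < j, u ∉ ball V start i) :
    dSpec V start u = min (j : Int) 100 := by
  unfold dSpec
  by_cases hex : ∃ k, k ∈ List.range 101 ∧ u ∈ ball V start k
  · rw [dif_pos hex]
    obtain ⟨hrange, hmem⟩ := Nat.find_spec hex
    have h1 : ¬ Nat.find hex < j := fun hlt => hmin _ hlt hmem
    have h2 : j ≤ 100 := by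
      by_contra hj100
      have hfr : Nat.find hex < 101 := List.mem_range.mp hrange
      exact hmin _ (by omega) hmem
    have h3 : Nat.find hex ≤ j := Nat.find_min' hex ⟨List.mem_range.mpr (by omega), hj⟩
    have h4 : Nat.find hex = j := by omega
    rw [h4]
    have : min ((j : Int)) 100 = j := min_eq_left (by exact_mod_cast h2)
    omega
  · rw [dif_neg hex]
    have h2 : ¬ j ≤ 100 := fun hle => hex ⟨j, List.mem_range.mpr (by omega), hj⟩
    have : min ((j : Int)) 100 = 100 := min_eq_right (by exact_mod_cast (by omega : 100 ≤ j))
    omega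

lemma dSpec_of_none (V : PySem.Dict String (Int × List String)) (start u : String)
    (h : ∀ k, u ∉ ball V start k) : dSpec V start u = 100 := by
  unfold dSpec
  rw [dif_neg (fun ⟨k, _, hk⟩ => h k hk)]

-- ---------- characterisation of the level-BFS loop ----------

lemma relaxB_char (L : Int) :
    ∀ (ns nxt : List String) (vis : PySem.Set String) (dist : PySem.Dict String Int),
    (∀ x, x ∈ (relaxB L ns nxt vis dist).1 ↔ x ∈ nxt ∨ (x ∈ ns ∧ x ∉ vis)) ∧
    (∀ x, x ∈ (relaxB L ns nxt vis dist).2.1 ↔ x ∈ vis ∨ x ∈ ns) ∧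
    (∀ x, (relaxB L ns nxt vis dist).2.2.getD x 100 =
       if x ∈ ns ∧ x ∉ vis then min (dist.getD x 100) (L + 1) else dist.getD x 100) := by
  intro ns
  induction ns with
  | nil =>
    intro nxt vis dist
    refine ⟨fun x => by simp [relaxB], fun x => by simp [relaxB], fun x => by simp [relaxB]⟩
  | cons u t ih =>
    intro nxt vis dist
    by_cases hu : u ∈ vis
    · have hc : PySem.Set.contains vis u = true := (PySem.Set.contains_iff vis u).mpr hu
      simp only [relaxB, hc, if_pos]
      obtain ⟨ha, hb, hc'⟩ := ih nxt vis dist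
      refine ⟨fun x => ?_, fun x => ?_, fun x => ?_⟩
      · rw [ha x]
        by_cases hx : x = u
        · subst hx; simp [hu]
        · simp [hx]
      · rw [hb x]
        by_cases hx : x = u
        · subst hx; simp [hu]
        · simp [hx]
      · rw [hc' x]
        by_cases hx : x = u
        · subst hx; simp [hu]
        · simp [hx]
    · have hc : PySem.Set.contains vis u = false := by
        rw [Bool.eq_false_iff]; intro h; exact hu ((PySem.Set.contains_iff vis u).mp h)
      simp only [relaxB, hc, Bool.false_eq_true, if_false]
      obtain ⟨ha, hb, hc'⟩ := ih (nxt ++ [u]) (PySem.Set.add vis u)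
        (dist.insert u (min (dist.getD u 100) (L + 1)))
      refine ⟨fun x => ?_, fun x => ?_, fun x => ?_⟩
      · rw [ha x]
        by_cases hx : x = u
        · subst hx; simp [hu, PySem.Set.mem_add]
        · simp [hx, PySem.Set.mem_add]
      · rw [hb x]
        by_cases hx : x = u
        · subst hx; simp [hu, PySem.Set.mem_add]
        · simp [hx, PySem.Set.mem_add]
      · rw [hc' x]
        by_cases hx : x = u
        · subst hx
          have hnm : ¬ (x ∈ t ∧ x ∉ PySem.Set.add vis x) := by
            rintro ⟨_, habs⟩
            exact habs ((PySem.Set.mem_add vis x x).mpr (Or.inr rfl))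
          rw [if_neg hnm, PySem.Dict.getD_insert, if_pos rfl, if_pos ⟨List.mem_cons_self, hu⟩]
        · rw [PySem.Dict.getD_insert, if_neg hx]
          have e1 : (x ∈ t ∧ x ∉ PySem.Set.add vis u) ↔ (x ∈ u :: t ∧ x ∉ vis) := by
            rw [PySem.Set.mem_add]
            constructor
            · rintro ⟨h1, h2⟩
              exact ⟨List.mem_cons_of_mem _ h1, fun hv => h2 (Or.inl hv)⟩
            · rintro ⟨h1, h2⟩
              rcases List.mem_cons.mp h1 with rfl | h1'
              · exact absurd rfl hx
              · exact ⟨h1', by rintro (hv | rfl); exact h2 hv; exact hx rfl⟩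
          rw [if_congr e1 rfl rfl]

lemma stepB_char (V : PySem.Dict String (Int × List String)) (L : Int) :
    ∀ (f nxt : List String) (vis : PySem.Set String) (dist : PySem.Dict String Int),
    (∀ x, x ∈ (stepB V L f nxt vis dist).1 ↔
       x ∈ nxt ∨ (x ∉ vis ∧ ∃ v ∈ f, x ∈ (V.getD v (0, [])).2)) ∧
    (∀ x, x ∈ (stepB V L f nxt vis dist).2.1 ↔ x ∈ vis ∨ ∃ v ∈ f, x ∈ (V.getD v (0, [])).2) ∧
    (∀ x, (stepB V L f nxt vis dist).2.2.getD x 100 =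
       if x ∉ vis ∧ ∃ v ∈ f, x ∈ (V.getD v (0, [])).2
       then min (dist.getD x 100) (L + 1) else dist.getD x 100) := by
  intro f
  induction f with
  | nil =>
    intro nxt vis dist
    refine ⟨fun x => by simp [stepB], fun x => by simp [stepB], fun x => by simp [stepB]⟩
  | cons v rest ih =>
    intro nxt vis dist
    simp only [stepB]
    obtain ⟨ra, rb, rc⟩ := relaxB_char L ((V.getD v (0, [])).2) nxt vis dist
    obtain ⟨sa, sb, sc⟩ := ih (relaxB L ((V.getD v (0, [])).2) nxt vis dist).1
      (relaxB L ((V.getD v (0, [])).2) nxt vis dist).2.1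
      (relaxB L ((V.getD v (0, [])).2) nxt vis dist).2.2
    refine ⟨fun x => ?_, fun x => ?_, fun x => ?_⟩
    · rw [sa x, ra x, rb x]
      constructor
      · rintro ((h | ⟨h1, h2⟩) | ⟨h1, v', hv', hadj⟩)
        · exact Or.inl h
        · exact Or.inr ⟨h2, v, List.mem_cons_self, h1⟩
        · rcases Decidable.em (x ∈ vis) with hvis | hvis
          · exact absurd (Or.inl hvis) h1
          · exact Or.inr ⟨hvis, v', List.mem_cons_of_mem _ hv', hadj⟩
      · rintro (h | ⟨h1, v', hv', hadj⟩)
        · exact Or.inl (Or.inl h)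
        · rcases List.mem_cons.mp hv' with rfl | hv''
          · exact Or.inl (Or.inr ⟨hadj, h1⟩)
          · rcases Decidable.em (x ∈ (V.getD v (0, [])).2) with hadj' | hadj'
            · exact Or.inl (Or.inr ⟨hadj', h1⟩)
            · exact Or.inr ⟨by rintro (h | h); exact h1 h; exact hadj' h,
                v', hv'', hadj⟩
    · rw [sb x, rb x]
      constructor
      · rintro ((h | h) | ⟨v', hv', hadj⟩)
        · exact Or.inl h
        · exact Or.inr ⟨v, List.mem_cons_self, h⟩
        · exact Or.inr ⟨v', List.mem_cons_of_mem _ hv', hadj⟩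
      · rintro (h | ⟨v', hv', hadj⟩)
        · exact Or.inl (Or.inl h)
        · rcases List.mem_cons.mp hv' with rfl | hv''
          · exact Or.inl (Or.inr hadj)
          · exact Or.inr ⟨v', hv'', hadj⟩
    · rw [sc x, rc x]
      set r := relaxB L ((V.getD v (0, [])).2) nxt vis dist with hr
      by_cases hvis : x ∈ vis
      · have hv' : x ∈ r.2.1 := (rb x).mpr (Or.inl hvis)
        have hB : ¬ (x ∈ (V.getD v (0, [])).2 ∧ x ∉ vis) := fun h => h.2 hvis
        have hA : ¬ (x ∉ r.2.1 ∧ ∃ v' ∈ rest, x ∈ (V.getD v' (0, [])).2) := fun h => h.1 hv'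
        have hC : ¬ (x ∉ vis ∧ ∃ v' ∈ v :: rest, x ∈ (V.getD v' (0, [])).2) := fun h => h.1 hvis
        rw [if_neg hB, if_neg hA, if_neg hC]
      · by_cases hadj : x ∈ (V.getD v (0, [])).2
        · have hv' : x ∈ r.2.1 := (rb x).mpr (Or.inr hadj)
          have hA : ¬ (x ∉ r.2.1 ∧ ∃ v' ∈ rest, x ∈ (V.getD v' (0, [])).2) := fun h => h.1 hv'
          have hC : x ∉ vis ∧ ∃ v' ∈ v :: rest, x ∈ (V.getD v' (0, [])).2 :=
            ⟨hvis, v, List.mem_cons_self, hadj⟩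
          have hBpos : x ∈ (V.getD v (0, [])).2 ∧ x ∉ vis := ⟨hadj, hvis⟩
          rw [if_pos hBpos, if_neg hA, if_pos hC]
        · have hv' : x ∉ r.2.1 := by
            intro hm
            rcases (rb x).mp hm with h | h
            · exact hvis h
            · exact hadj h
          have hB : ¬ (x ∈ (V.getD v (0, [])).2 ∧ x ∉ vis) := fun h => hadj h.1
          rw [if_neg hB]
          by_cases hrest : ∃ v' ∈ rest, x ∈ (V.getD v' (0, [])).2
          · have hC : x ∉ vis ∧ ∃ v' ∈ v :: rest, x ∈ (V.getD v' (0, [])).2 :=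
              ⟨hvis, by obtain ⟨v', hv'', h⟩ := hrest; exact ⟨v', List.mem_cons_of_mem _ hv'', h⟩⟩
            have hApos : x ∉ r.2.1 ∧ ∃ v' ∈ rest, x ∈ (V.getD v' (0, [])).2 := ⟨hv', hrest⟩
            rw [if_pos hApos, if_pos hC]
          · have hC : ¬ (x ∉ vis ∧ ∃ v' ∈ v :: rest, x ∈ (V.getD v' (0, [])).2) := by
              rintro ⟨_, v', hv'', h⟩
              rcases List.mem_cons.mp hv'' with rfl | hv3
              · exact hadj h
              · exact hrest ⟨v', hv3, h⟩
            rw [if_neg (fun (h : x ∉ r.2.1 ∧ _) => hrest h.2), if_neg hC]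

lemma loopB_cons (V : PySem.Dict String (Int × List String)) (start v : String)
    (rest : List String) (vis : PySem.Set String) (dist : PySem.Dict String Int) (level : Int) :
    loopB V start (v :: rest) vis dist level =
      loopB V start (stepB V level (v :: rest) [] vis dist).1
        (stepB V level (v :: rest) [] vis dist).2.1
        (stepB V level (v :: rest) [] vis dist).2.2 (level + 1) := by
  rw [loopB]

-- a node of ball L is either in the frontier (new at L) or already in some smaller ball
lemma pv_front_aux (V : PySem.Dict String (Int × List String)) (start : String)
    (f : List String) (L : Nat)
    (hf : ∀ x, x ∈ f ↔ (x ∈ ball V start L ∧ ∀ j < L, x ∉ ball V start j))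
    (w : String) (hw : w ∈ ball V start L) :
    w ∈ f ∨ ∃ i < L, w ∈ ball V start i := by
  have hex : ∃ k, w ∈ ball V start k := ⟨L, hw⟩
  have hi : w ∈ ball V start (Nat.find hex) := Nat.find_spec hex
  have hiL : Nat.find hex ≤ L := Nat.find_min' hex hw
  rcases lt_or_eq_of_le hiL with hlt | heq
  · exact Or.inr ⟨Nat.find hex, hlt, hi⟩
  · exact Or.inl ((hf w).mpr ⟨hw, fun j hj => Nat.find_min hex (by omega)⟩)

-- when the frontier is empty the balls have stabilised and dist equals dSpec everywhere
lemma loopB_fix (V : PySem.Dict String (Int × List String)) (start : String)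
    (vis : PySem.Set String) (dist : PySem.Dict String Int) (L : Nat)
    (hvis : ∀ x, x ∈ vis ↔ x ∈ ball V start L)
    (hf : ∀ x, x ∈ ([] : List String) ↔ (x ∈ ball V start L ∧ ∀ j < L, x ∉ ball V start j))
    (hdist : ∀ x (j : Nat), x ∈ ball V start j → (∀ i < j, x ∉ ball V start i) → j ≤ L →
        dist.getD x 100 = min (j : Int) 100)
    (hd100 : ∀ x, x ∉ vis → dist.getD x 100 = 100) :
    ∀ u, dist.getD u 100 = dSpec V start u := by
  match L with
  | 0 =>
    exfalso
    have := (hf start).mpr ⟨(mem_ball_zero V start start).mpr rfl, by omega⟩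
    simp at this
  | L' + 1 =>
    have hsub : ∀ x, x ∈ ball V start (L' + 1) → x ∈ ball V start L' := by
      intro x hx
      rcases pv_front_aux V start [] (L' + 1) hf x hx with habs | ⟨i, hi, hxi⟩
      · simp at habs
      · exact ball_mono V start (by omega) x hxi
    have hstab := ball_stable V start L' hsub
    intro u
    by_cases hex : ∃ k, u ∈ ball V start k
    · have hj : u ∈ ball V start (Nat.find hex) := Nat.find_spec hex
      have hmin : ∀ i < Nat.find hex, u ∉ ball V start i := fun i hi => Nat.find_min hex hi
      have hjle : Nat.find hex ≤ L' + 1 := by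
        by_contra hgt
        exact hmin L' (by omega) (hstab _ u hj)
      rw [hdist u (Nat.find hex) hj hmin hjle, dSpec_of_least V start u (Nat.find hex) hj hmin]
    · push_neg at hex
      rw [dSpec_of_none V start u hex, hd100 u (fun hv => hex _ ((hvis u).mp hv))]

lemma loopB_spec (V : PySem.Dict String (Int × List String)) (start : String) :
    ∀ (N : Nat) (f : List String) (vis : PySem.Set String) (dist : PySem.Dict String Int) (L : Nat),
    pvUnvis (pvUniv V start) vis + f.length ≤ N →
    (∀ x, x ∈ vis ↔ x ∈ ball V start L) →
    (∀ x, x ∈ f ↔ (x ∈ ball V start L ∧ ∀ j < L, x ∉ ball V start j)) →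
    (∀ x (j : Nat), x ∈ ball V start j → (∀ i < j, x ∉ ball V start i) → j ≤ L →
        dist.getD x 100 = min (j : Int) 100) →
    (∀ x, x ∉ vis → dist.getD x 100 = 100) →
    ∀ u, (loopB V start f vis dist (L : Int)).getD u 100 = dSpec V start u := by
  intro N
  induction N with
  | zero =>
    intro f vis dist L hM hvis hf hdist hd100
    have hfnil : f = [] := List.length_eq_zero_iff.mp (by omega)
    subst hfnil
    rw [loopB]
    exact loopB_fix V start vis dist L hvis hf hdist hd100
  | succ N ih =>
    intro f vis dist L hM hvis hf hdist hd100
    match f with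
    | [] =>
      rw [loopB]
      exact loopB_fix V start vis dist L hvis hf hdist hd100
    | v :: rest =>
      rw [loopB_cons]
      obtain ⟨sa, sb, sc⟩ := stepB_char V (L : Int) (v :: rest) [] vis dist
      set r := stepB V (L : Int) (v :: rest) [] vis dist with hrdef
      have hmeas := stepB_meas V start (L : Int) (v :: rest) [] vis dist
      rw [← hrdef] at hmeas
      -- new visited set is ball (L+1)
      have hvis' : ∀ x, x ∈ r.2.1 ↔ x ∈ ball V start (L + 1) := by
        intro x
        rw [sb x, mem_ball_succ]
        constructor
        · rintro (hx | ⟨w, hwf, hadj⟩)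
          · exact Or.inl ((hvis x).mp hx)
          · exact Or.inr ⟨w, ((hf w).mp hwf).1, hadj⟩
        · rintro (hx | ⟨w, hw, hadj⟩)
          · exact Or.inl ((hvis x).mpr hx)
          · rcases pv_front_aux V start (v :: rest) L hf w hw with hwf | ⟨i, hi, hwi⟩
            · exact Or.inr ⟨w, hwf, hadj⟩
            · exact Or.inl ((hvis x).mpr (ball_mono V start (by omega : i + 1 ≤ L) x
                ((mem_ball_succ V start x i).mpr (Or.inr ⟨w, hwi, hadj⟩))))
      -- new frontier is exactly the nodes new at level L+1
      have hf' : ∀ x, x ∈ r.1 ↔ (x ∈ ball V start (L + 1) ∧ ∀ j < L + 1, x ∉ ball V start j) := by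
        intro x
        rw [sa x]
        simp only [List.not_mem_nil, false_or]
        constructor
        · rintro ⟨hnv, w, hwf, hadj⟩
          refine ⟨(mem_ball_succ V start x L).mpr (Or.inr ⟨w, ((hf w).mp hwf).1, hadj⟩), ?_⟩
          intro j hj hxj
          exact hnv ((hvis x).mpr (ball_mono V start (by omega : j ≤ L) x hxj))
        · rintro ⟨hb1, hb2⟩
          have hnv : x ∉ vis := fun hv => hb2 L (by omega) ((hvis x).mp hv)
          refine ⟨hnv, ?_⟩
          rcases (mem_ball_succ V start x L).mp hb1 with hx | ⟨w, hw, hadj⟩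
          · exact absurd hx (hb2 L (by omega))
          · rcases pv_front_aux V start (v :: rest) L hf w hw with hwf | ⟨i, hi, hwi⟩
            · exact ⟨w, hwf, hadj⟩
            · exact absurd ((mem_ball_succ V start x i).mpr (Or.inr ⟨w, hwi, hadj⟩))
                (hb2 (i + 1) (by omega))
      -- new distances record the level of every newly discovered node
      have hdist' : ∀ x (j : Nat), x ∈ ball V start j → (∀ i < j, x ∉ ball V start i) →
          j ≤ L + 1 → r.2.2.getD x 100 = min (j : Int) 100 := by
        intro x j hxj hminj hjle
        rw [sc x]
        by_cases hjL : j ≤ L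
        · rw [if_neg, hdist x j hxj hminj hjL]
          rintro ⟨hnv, _⟩
          exact hnv ((hvis x).mpr (ball_mono V start hjL x hxj))
        · have hj1 : j = L + 1 := by omega
          subst hj1
          have hnv : x ∉ vis := fun hv => hminj L (by omega) ((hvis x).mp hv)
          have hexadj : ∃ w ∈ v :: rest, x ∈ (V.getD w (0, [])).2 := by
            rcases (mem_ball_succ V start x L).mp hxj with hx | ⟨w, hw, hadj⟩
            · exact absurd hx (hminj L (by omega))
            · rcases pv_front_aux V start (v :: rest) L hf w hw with hwf | ⟨i, hi, hwi⟩
              · exact ⟨w, hwf, hadj⟩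
              · exact absurd ((mem_ball_succ V start x i).mpr (Or.inr ⟨w, hwi, hadj⟩))
                  (hminj (i + 1) (by omega))
          rw [if_pos ⟨hnv, hexadj⟩, hd100 x hnv]
          push_cast
          omega
      have hd100' : ∀ x, x ∉ r.2.1 → r.2.2.getD x 100 = 100 := by
        intro x hx
        rw [sc x, if_neg, hd100 x (fun hv => hx ((sb x).mpr (Or.inl hv)))]
        rintro ⟨_, hadj⟩
        exact hx ((sb x).mpr (Or.inr hadj))
      have hfuel : pvUnvis (pvUniv V start) r.2.1 + r.1.length ≤ N := by
        simp only [List.length_cons, List.length_nil] at hM hmeas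
        omega
      have hcast : ((L : Int) + 1) = ((L + 1 : Nat) : Int) := by push_cast; ring
      rw [hcast]
      exact ih r.1 r.2.1 r.2.2 (L + 1) hfuel hvis' hf' hdist' hd100'

-- ---------- characterisation of the Bellman-Ford rounds ----------

lemma bfEdge_le (d : PySem.Dict String Int) (v u x : String) :
    (bfEdge d v u).getD x 100 ≤ d.getD x 100 := by
  unfold bfEdge
  split_ifs with h
  · rw [PySem.Dict.getD_insert]
    split_ifs with hx
    · subst hx; omega
    · exact le_refl _
  · exact le_refl _

lemma foldl_edge_le (v : String) :
    ∀ (us : List String) (d : PySem.Dict String Int) (x : String),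
    (us.foldl (fun d u => bfEdge d v u) d).getD x 100 ≤ d.getD x 100 := by
  intro us
  induction us with
  | nil => intro d x; exact le_refl _
  | cons w t ih =>
    intro d x
    exact le_trans (ih (bfEdge d v w) x) (bfEdge_le d v w x)

lemma bfRound_le :
    ∀ (items : List (String × Int × List String)) (d : PySem.Dict String Int) (x : String),
    (bfRound items d).getD x 100 ≤ d.getD x 100 := by
  intro items
  induction items with
  | nil => intro d x; exact le_refl _
  | cons q t ih =>
    intro d x
    exact le_trans (ih (bfNode d q) x) (foldl_edge_le q.1 q.2.2 d x)

-- every stored distance is ≥ 0, ≤ 100, and (when < 100) witnessed by a path of that length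
def bfLow (V : PySem.Dict String (Int × List String)) (start : String)
    (d : PySem.Dict String Int) : Prop :=
  ∀ x, 0 ≤ d.getD x 100 ∧ d.getD x 100 ≤ 100 ∧
    (d.getD x 100 < 100 → x ∈ ball V start (d.getD x 100).toNat)

-- after k rounds every node within distance j ≤ k (j ≤ 100) has stored distance ≤ j
def bfUp (V : PySem.Dict String (Int × List String)) (start : String) (k : Nat)
    (d : PySem.Dict String Int) : Prop :=
  ∀ (j : Nat) (x : String), j ≤ k → j ≤ 100 → x ∈ ball V start j → d.getD x 100 ≤ (j : Int)

lemma bfEdge_low (V : PySem.Dict String (Int × List String)) (start v u : String)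
    (hadj : u ∈ (V.getD v (0, [])).2) (d : PySem.Dict String Int)
    (hlow : bfLow V start d) : bfLow V start (bfEdge d v u) := by
  unfold bfEdge
  split_ifs with h
  · intro x
    rw [PySem.Dict.getD_insert]
    split_ifs with hx
    · subst hx
      obtain ⟨hv0, hv100, hvball⟩ := hlow v
      obtain ⟨hu0, hu100, _⟩ := hlow x
      refine ⟨by omega, by omega, fun _ => ?_⟩
      have hvlt : d.getD v 100 < 100 := by omega
      have hmem : x ∈ ball V start ((d.getD v 100).toNat + 1) :=
        (mem_ball_succ V start x _).mpr (Or.inr ⟨v, hvball hvlt, hadj⟩)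
      have ht : (d.getD v 100 + 1).toNat = (d.getD v 100).toNat + 1 := by omega
      rw [ht]
      exact hmem
    · exact hlow x
  · exact hlow

lemma foldl_edge_low (V : PySem.Dict String (Int × List String)) (start v : String) :
    ∀ (us : List String) (d : PySem.Dict String Int),
    (∀ u ∈ us, u ∈ (V.getD v (0, [])).2) → bfLow V start d →
    bfLow V start (us.foldl (fun d u => bfEdge d v u) d) := by
  intro us
  induction us with
  | nil => intro d _ hlow; exact hlow
  | cons w t ih =>
    intro d hus hlow
    exact ih (bfEdge d v w) (fun u hu => hus u (List.mem_cons_of_mem _ hu))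
      (bfEdge_low V start v w (hus w List.mem_cons_self) d hlow)

lemma bfRound_low (V : PySem.Dict String (Int × List String)) (start : String) :
    ∀ (items : List (String × Int × List String)) (d : PySem.Dict String Int),
    (∀ p ∈ items, ∀ u ∈ p.2.2, u ∈ (V.getD p.1 (0, [])).2) → bfLow V start d →
    bfLow V start (bfRound items d) := by
  intro items
  induction items with
  | nil => intro d _ hlow; exact hlow
  | cons q t ih =>
    intro d hit hlow
    exact ih (bfNode d q) (fun p hp => hit p (List.mem_cons_of_mem _ hp))
      (foldl_edge_low V start q.1 q.2.2 d (hit q List.mem_cons_self) hlow)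

lemma foldl_edge_relax (v : String) :
    ∀ (us : List String) (d : PySem.Dict String Int) (u : String), u ∈ us →
    (us.foldl (fun d u => bfEdge d v u) d).getD u 100 ≤ d.getD v 100 + 1 := by
  intro us
  induction us with
  | nil => intro d u hu; simp at hu
  | cons w t ih =>
    intro d u hu
    rcases List.mem_cons.mp hu with rfl | hm
    · have h1 : (bfEdge d v u).getD u 100 ≤ d.getD v 100 + 1 := by
        unfold bfEdge
        split_ifs with h
        · rw [PySem.Dict.getD_insert, if_pos rfl]
        · omega
      have h2 : (bfEdge d v u).getD v 100 ≤ d.getD v 100 := bfEdge_le d v u v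
      calc (t.foldl (fun d u => bfEdge d v u) (bfEdge d v u)).getD u 100
          ≤ (bfEdge d v u).getD u 100 := foldl_edge_le v t (bfEdge d v u) u
        _ ≤ d.getD v 100 + 1 := h1
    · have h2 : (bfEdge d v w).getD v 100 ≤ d.getD v 100 := bfEdge_le d v w v
      calc (t.foldl (fun d u => bfEdge d v u) (bfEdge d v w)).getD u 100
          ≤ (bfEdge d v w).getD v 100 + 1 := ih (bfEdge d v w) u hm
        _ ≤ d.getD v 100 + 1 := by omega

lemma bfRound_relax :
    ∀ (items : List (String × Int × List String)) (d : PySem.Dict String Int)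
      (p : String × Int × List String), p ∈ items → ∀ u ∈ p.2.2,
    (bfRound items d).getD u 100 ≤ d.getD p.1 100 + 1 := by
  intro items
  induction items with
  | nil => intro d p hp; simp at hp
  | cons q t ih =>
    intro d p hp u hu
    rcases List.mem_cons.mp hp with rfl | hm
    · calc (bfRound t (bfNode d p)).getD u 100
          ≤ (bfNode d p).getD u 100 := bfRound_le t (bfNode d p) u
        _ ≤ d.getD p.1 100 + 1 := foldl_edge_relax p.1 p.2.2 d u hu
    · have h2 : (bfNode d q).getD p.1 100 ≤ d.getD p.1 100 := foldl_edge_le q.1 q.2.2 d p.1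
      calc (bfRound t (bfNode d q)).getD u 100
          ≤ (bfNode d q).getD p.1 100 + 1 := ih (bfNode d q) p hm u hu
        _ ≤ d.getD p.1 100 + 1 := by omega

lemma ball_keys (V : PySem.Dict String (Int × List String)) (start : String)
    (hs : start ∈ V.keys)
    (hnb : ∀ v, ∀ u ∈ (V.getD v (0, [])).2, u ∈ V.keys) :
    ∀ (j : Nat) (x : String), x ∈ ball V start j → x ∈ V.keys := by
  intro j
  induction j with
  | zero => intro x hx; rw [mem_ball_zero] at hx; exact hx ▸ hs
  | succ k ih =>
    intro x hx
    rcases (mem_ball_succ V start x k).mp hx with hx' | ⟨v, _, hadj⟩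
    · exact ih x hx'
    · exact hnb v x hadj

lemma bfRound_up (V : PySem.Dict String (Int × List String)) (start : String)
    (hs : start ∈ V.keys)
    (hnb : ∀ v, ∀ u ∈ (V.getD v (0, [])).2, u ∈ V.keys)
    (k : Nat) (d : PySem.Dict String Int) (hup : bfUp V start k d) :
    bfUp V start (k + 1) (bfRound V.items d) := by
  intro j x hj h100 hx
  match j with
  | 0 =>
    calc (bfRound V.items d).getD x 100 ≤ d.getD x 100 := bfRound_le V.items d x
      _ ≤ 0 := hup 0 x (by omega) (by omega) hx
  | i + 1 =>
    rcases (mem_ball_succ V start x i).mp hx with hx' | ⟨v, hv, hadj⟩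
    · have := hup i x (by omega) (by omega) hx'
      have hle := bfRound_le V.items d x
      push_cast
      omega
    · have hdv := hup i v (by omega) (by omega) hv
      have hvk : v ∈ V.keys := ball_keys V start hs hnb i v hv
      obtain ⟨val, hval⟩ : ∃ val, V.get? v = some val := by
        rcases hg : V.get? v with _ | val
        · exact absurd ((PySem.Dict.get?_eq_none_iff_not_mem_keys V v).mp hg hvk) (fun h => h)
        · exact ⟨val, rfl⟩
      have hpm : (v, val) ∈ V.items := PySem.Dict.mem_items_of_get?_eq_some V hval
      have hadj' : x ∈ (v, val).2.2 := by
        rw [PySem.Dict.getD_eq_get?_getD, hval] at hadj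
        exact hadj
      have hrel : (bfRound V.items d).getD x 100 ≤ d.getD v 100 + 1 :=
        bfRound_relax V.items d (v, val) hpm x hadj'
      push_cast
      omega

lemma bfIter (V : PySem.Dict String (Int × List String)) (start : String)
    (hs : start ∈ V.keys)
    (hnb : ∀ v, ∀ u ∈ (V.getD v (0, [])).2, u ∈ V.keys)
    (hit : ∀ p ∈ V.items, ∀ u ∈ p.2.2, u ∈ (V.getD p.1 (0, [])).2) :
    ∀ (l : List Int) (d : PySem.Dict String Int) (k : Nat),
    bfLow V start d → bfUp V start k d →
    bfLow V start (l.foldl (fun d _ => bfRound V.items d) d) ∧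
      bfUp V start (k + l.length) (l.foldl (fun d _ => bfRound V.items d) d) := by
  intro l
  induction l with
  | nil => intro d k hlow hup; exact ⟨hlow, by simpa using hup⟩
  | cons a t ih =>
    intro d k hlow hup
    have h1 := ih (bfRound V.items d) (k + 1)
      (bfRound_low V start V.items d hit hlow)
      (bfRound_up V start hs hnb k d hup)
    have hlen : k + (a :: t).length = (k + 1) + t.length := by
      simp [List.length_cons]; omega
    rw [hlen]
    simpa using h1

lemma bf_final (V : PySem.Dict String (Int × List String)) (start : String)
    (d : PySem.Dict String Int) (hlow : bfLow V start d) (hup : bfUp V start 101 d) :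
    ∀ u, d.getD u 100 = dSpec V start u := by
  intro u
  obtain ⟨h0, h100, hball⟩ := hlow u
  by_cases hex : ∃ k, u ∈ ball V start k
  · have hj : u ∈ ball V start (Nat.find hex) := Nat.find_spec hex
    have hmin : ∀ i < Nat.find hex, u ∉ ball V start i := fun i hi => Nat.find_min hex hi
    rw [dSpec_of_least V start u (Nat.find hex) hj hmin]
    by_cases hj100 : Nat.find hex ≤ 100
    · have hle := hup (Nat.find hex) u (by omega) hj100 hj
      have hcast : ((Nat.find hex : Nat) : Int) ≤ 100 := by exact_mod_cast hj100
      have hne : ¬ d.getD u 100 < ((Nat.find hex : Nat) : Int) := by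
        intro hlt
        exact hmin (d.getD u 100).toNat (by omega) (hball (by omega))
      omega
    · have hcast : (100 : Int) < ((Nat.find hex : Nat) : Int) := by
        exact_mod_cast (by omega : (100 : Nat) < Nat.find hex)
      have hd : ¬ d.getD u 100 < 100 := by
        intro hlt
        exact hmin (d.getD u 100).toNat (by omega) (hball hlt)
      omega
  · rw [dSpec_of_none V start u (by rwa [not_exists] at hex)]
    have hd : ¬ d.getD u 100 < 100 := by
      intro hlt
      rw [not_exists] at hex
      exact hex _ (hball hlt)
    omega

theorem alt_equiv (valves : List (String × Int × List String)) (start : String) (time : Int)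
    (hpre : Pre_best_flow valves start time) :
    levelAlt valves start time = best_flow_alt valves start time := by
  obtain ⟨hnd, hsk, hnb⟩ := hpre
  simp only [levelAlt, best_flow_alt]
  set V := PySem.Dict.ofList valves with hV
  have hVit : V.items = valves := ofList_items_of_nodup valves hnd
  have hVkeys : V.keys = valves.map Prod.fst := by simp only [PySem.Dict.keys, hVit]
  have hknd : V.keys.Nodup := by rw [hVkeys]; exact hnd
  have hskV : start ∈ V.keys := by rw [hVkeys]; exact hsk
  have hnbV : ∀ p ∈ V.items, ∀ u ∈ p.2.2, u ∈ V.keys := by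
    rw [hVit]
    intro p hp u hu
    rw [hVkeys]
    exact hnb p hp u hu
  have hadjK : ∀ v, ∀ u ∈ (V.getD v (0, [])).2, u ∈ V.keys := neigh_keys V hnbV
  have hmapfst : (V.items.map Prod.fst).Nodup := by rw [hVit]; exact hnd
  have hit : ∀ p ∈ V.items, ∀ u ∈ p.2.2, u ∈ (V.getD p.1 (0, [])).2 := by
    intro p hp u hu
    rw [PySem.Dict.getD_of_mem_items V hp hknd (0, [])]
    exact hu
  -- the level-BFS distance map equals dSpec
  set dist0L := (V.items.foldl (fun d p => d.insert p.1 (100 : Int)) PySem.Dict.empty).insert start 0 with hdist0L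
  have hdist0D : ∀ k, dist0L.getD k 100 = if k = start then 0 else 100 := by
    intro k
    rw [hdist0L, PySem.Dict.getD_insert]
    by_cases hks : k = start
    · rw [if_pos hks, if_pos hks]
    · rw [if_neg hks, if_neg hks]
      have hfold := get?_foldl_insert (fun _ => (100 : Int)) V.items PySem.Dict.empty k hmapfst
      rw [PySem.Dict.getD_eq_get?_getD, hfold]
      rcases hf : V.items.find? (fun p => p.1 == k) with _ | p <;> rw [hf] <;> rfl
  have hL : ∀ u, (loopB V start [start] (PySem.Set.add PySem.Set.empty start) dist0L 0).getD u 100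
      = dSpec V start u := by
    have := loopB_spec V start
      (pvUnvis (pvUniv V start) (PySem.Set.add PySem.Set.empty start) + 1)
      [start] (PySem.Set.add PySem.Set.empty start) dist0L 0
      (by simp)
      (by
        intro x
        rw [mem_ball_zero]
        show x ∈ [start] ↔ x = start
        simp)
      (by
        intro x
        rw [mem_ball_zero]
        constructor
        · intro hx
          have : x = start := by simpa using hx
          exact ⟨this, by omega⟩
        · rintro ⟨hx, _⟩
          simp [hx])
      (by
        intro x j hxj hmin hj0
        have hj : j = 0 := by omega
        subst hj
        rw [mem_ball_zero] at hxj
        rw [hdist0D, if_pos hxj]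
        norm_num)
      (by
        intro x hx
        rw [hdist0D, if_neg (by simpa using hx)])
    exact this
  -- the Bellman-Ford distance map equals dSpec
  set dist0B := V.items.foldl
      (fun d p => d.insert p.1 (if p.1 == start then (0 : Int) else 100)) PySem.Dict.empty with hdist0B
  have hB0 : ∀ x, dist0B.getD x 100 = if x = start then 0 else 100 := by
    intro x
    have hfold := get?_foldl_insert (fun p => if p.1 == start then (0 : Int) else 100)
      V.items PySem.Dict.empty x hmapfst
    rcases hf : V.items.find? (fun p => p.1 == x) with _ | p <;> rw [hf] at hfold
    · have hnk : x ∉ V.keys := by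
        apply (PySem.Dict.get?_eq_none_iff_not_mem_keys V x).mp
        show (V.items.find? (fun p => p.1 == x)).map (fun q => q.2) = none
        rw [hf]; rfl
      rw [PySem.Dict.getD_eq_get?_getD, hdist0B, hfold,
        if_neg (fun hxs => hnk (by rw [hxs]; exact hskV))]
      rfl
    · have hp1 : p.1 = x := by simpa using List.find?_some hf
      rw [PySem.Dict.getD_eq_get?_getD, hdist0B, hfold]
      by_cases hxs : x = start <;> simp [hp1, hxs]
  have hlow0 : bfLow V start dist0B := by
    intro x
    rw [hB0 x]
    split_ifs with hx
    · refine ⟨by norm_num, by norm_num, fun _ => ?_⟩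
      have h0 : ((0 : Int)).toNat = 0 := rfl
      rw [h0, mem_ball_zero]
      exact hx
    · exact ⟨by norm_num, le_refl _, fun h => absurd h (by norm_num)⟩
  have hup0 : bfUp V start 0 dist0B := by
    intro j x hj h100 hx
    have hj0 : j = 0 := by omega
    subst hj0
    rw [mem_ball_zero] at hx
    rw [hB0, if_pos hx]
    norm_num
  obtain ⟨hlowF, hupF⟩ := bfIter V start hskV hadjK hit
    (PySem.List.pyRange 0 101 1) dist0B 0 hlow0 hup0
  have hlen : (0 : Nat) + (PySem.List.pyRange 0 101 1).length = 101 := by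
    rw [PySem.List.length_pyRange_one]
    rfl
  rw [hlen] at hupF
  have hB := bf_final V start _ hlowF hupF
  -- the two output maps agree pointwise
  apply List.map_congr_left
  intro p hp
  rw [hL p.1, hB p.1]

-- ===== VERDICT (by name: the statement is the Claim_ definition above) =====
theorem best_flow_spec : Claim_equal_best_flow := by
  intro valves start_valve time _ hpre
  unfold Spec_best_flow
  exact (main_equiv valves start_valve time hpre).trans (alt_equiv valves start_valve time hpre)
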